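-- pv_equiv track=rewrite | github.com/samcsk/advent-of-code-2024 | day4/day4.py | find_letters_in_array
-- ===== SOURCE A (Python) =====
-- from typing import NamedTuple, Self
--
-- class Point(NamedTuple):
--     x: int
--     y: int
--
--     def __add__(self, val2: Self) -> "Point":
--         return Point(self.x + val2.x, self.y + val2.y)
--
--     def __mul__(self, val: int):
--         return Point(self.x * val, self.y * val)
--
-- def find_letters_in_array(
--     array: list[str], letters: dict[str, list]
-- ) -> dict[str, list]:
--     for letter in letters.keys():
--         if len(letter) != 1:
--             raise TypeError("letter must be of length 1")
--     for y, row in enumerate(array):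
--         for x, _letter in enumerate(row):
--             if _letter in letters.keys():
--                 letters[_letter].append(Point(x=x, y=y))
--     return letters
-- ===== SOURCE B (Python) =====
-- from typing import NamedTuple, Self
--
-- class Point(NamedTuple):
--     x: int
--     y: int
--
--     def __add__(self, val2: Self) -> "Point":
--         return Point(self.x + val2.x, self.y + val2.y)
--
--     def __mul__(self, val: int):
--         return Point(self.x * val, self.y * val)
--
-- def find_letters_in_array(
--     array: list[str], letters: dict[str, list]
-- ) -> dict[str, list]:
--     for letter in letters.keys():
--         if len(letter) != 1:
--             raise TypeError("letter must be of length 1")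
--     # Build one index of ALL character occurrences in a single grid pass,
--     # then merge the requested letters' occurrence lists in; no per-cell
--     # membership test against `letters` and no per-cell dict mutation of it.
--     occ: dict[str, list] = {}
--     for y, row in enumerate(array):
--         for x, ch in enumerate(row):
--             occ.setdefault(ch, []).append(Point(x=x, y=y))
--     for letter, points in letters.items():
--         points.extend(occ.get(letter, []))
--     return letters
-- ===== Notes on version B (the rewrite author's own statement) =====
-- stated objective: alternative
-- what changed: Instead of testing every grid cell for membership in `letters` and appending into it cell by cell, B builds a full character->positions index in one grid pass with dict.setdefault and then extends each requested letter's list once from that index.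
import Mathlib
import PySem

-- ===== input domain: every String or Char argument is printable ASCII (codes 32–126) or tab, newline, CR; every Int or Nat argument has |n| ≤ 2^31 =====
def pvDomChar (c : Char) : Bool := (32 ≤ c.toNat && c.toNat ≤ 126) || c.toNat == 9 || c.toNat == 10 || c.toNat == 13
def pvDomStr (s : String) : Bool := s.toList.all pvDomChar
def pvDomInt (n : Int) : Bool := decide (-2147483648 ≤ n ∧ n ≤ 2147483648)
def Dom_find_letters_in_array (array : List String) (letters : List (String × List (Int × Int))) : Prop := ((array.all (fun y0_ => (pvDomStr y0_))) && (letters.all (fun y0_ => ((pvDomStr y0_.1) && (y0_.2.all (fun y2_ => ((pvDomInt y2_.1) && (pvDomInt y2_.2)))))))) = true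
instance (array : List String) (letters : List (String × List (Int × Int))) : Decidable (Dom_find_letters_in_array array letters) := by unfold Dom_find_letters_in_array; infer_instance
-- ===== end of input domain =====

-- B replaces A's per-cell membership test and in-place dict append with a single-pass
-- character->positions index that is then merged into the requested letters (alternative
-- decomposition, same cost class). Both Pythons mutate `letters` in place identically;
-- the equivalence proved here is about the returned value.


-- ===== PORT A =====
-- `letters[_letter].append(p)`: append to the value of the (unique; first) entry with that key.
def pvAppendAt (d : List (String × List (Int × Int))) (k : String) (p : Int × Int) :
    List (String × List (Int × Int)) :=
  match d with
  | [] => []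
  | (k', v) :: rest =>
      if k' == k then (k', v ++ [p]) :: rest else (k', v) :: pvAppendAt rest k p

def find_letters_in_array (array : List String) (letters : List (String × List (Int × Int))) : List (String × List (Int × Int)) :=
  -- the validation loop raises TypeError on any key of length ≠ 1: excluded by Pre_
  (PySem.List.enumerate array).foldl
    (fun acc yrow =>
      (PySem.List.enumerate yrow.2.toList).foldl
        (fun acc2 xc =>
          if acc2.any (fun kv => kv.1 == String.ofList [xc.2]) then
            pvAppendAt acc2 (String.ofList [xc.2]) (xc.1, yrow.1)
          else acc2)
        acc)
    letters

-- ===== PORT B =====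
-- `occ.setdefault(ch, []).append(p)`: append to the first entry with that key,
-- inserting an (ch, [p]) entry at the end if the key is absent (Python dict semantics, exact).
def pvSetAppend (d : List (String × List (Int × Int))) (k : String) (p : Int × Int) :
    List (String × List (Int × Int)) :=
  match d with
  | [] => [(k, [p])]
  | (k', v) :: rest =>
      if k' == k then (k', v ++ [p]) :: rest else (k', v) :: pvSetAppend rest k p

-- `occ.get(k, [])`: value of the first entry with key k, else [] (exact dict lookup).
def pvGetD (d : List (String × List (Int × Int))) (k : String) : List (Int × Int) :=
  match d with
  | [] => []
  | (k', v) :: rest => if k' == k then v else pvGetD rest k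

def pvOccIndex (array : List String) : List (String × List (Int × Int)) :=
  (PySem.List.enumerate array).foldl
    (fun acc yrow =>
      (PySem.List.enumerate yrow.2.toList).foldl
        (fun acc2 xc => pvSetAppend acc2 (String.ofList [xc.2]) (xc.1, yrow.1))
        acc)
    []

def find_letters_in_array_alt (array : List String) (letters : List (String × List (Int × Int))) : List (String × List (Int × Int)) :=
  -- the validation loop raises TypeError on any key of length ≠ 1: excluded by Pre_
  letters.map (fun kv => (kv.1, kv.2 ++ pvGetD (pvOccIndex array) kv.1))

-- ===== PRECONDITION & SPEC =====
-- Pre_ excludes (i) any key of length ≠ 1, on which A raises TypeError before doing anything,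
-- and (ii) association lists with duplicate keys, which no Python dict argument can represent
-- (a Python dict's keys are unique), so first-match-vs-every-match behaviour there is accidental.
def Pre_find_letters_in_array (array : List String) (letters : List (String × List (Int × Int))) : Prop :=
  (∀ kv ∈ letters, PySem.Str.len kv.1 = 1) ∧ (letters.map Prod.fst).Nodup
instance (array : List String) (letters : List (String × List (Int × Int))) : Decidable (Pre_find_letters_in_array array letters) := by unfold Pre_find_letters_in_array; infer_instance

def pvWitness_find_letters_in_array : List String × (List (String × List (Int × Int))) :=
  (["ab", "ba"], [("a", []), ("b", [(0, 0)])])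

def Spec_find_letters_in_array (array : List String) (letters : List (String × List (Int × Int))) (out : List (String × List (Int × Int))) : Prop := out = find_letters_in_array_alt array letters
instance (array : List String) (letters : List (String × List (Int × Int))) (out : List (String × List (Int × Int))) : Decidable (Spec_find_letters_in_array array letters out) := by unfold Spec_find_letters_in_array; infer_instance

-- ===== CLAIM (what is proved, stated in full; the proofs are below) =====
def Claim_equal_find_letters_in_array : Prop := ∀ (array : List String) (letters : List (String × List (Int × Int))), Dom_find_letters_in_array array letters → Pre_find_letters_in_array array letters → Spec_find_letters_in_array array letters (find_letters_in_array array letters)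

-- ===== LEMMAS AND PROOFS =====

-- The row-major list of (single-char key, point) cells both ports traverse.
def pvCells (array : List String) : List (String × (Int × Int)) :=
  (PySem.List.enumerate array).flatMap (fun yrow =>
    (PySem.List.enumerate yrow.2.toList).map (fun xc => (String.ofList [xc.2], (xc.1, yrow.1))))

theorem pvNested_foldl {α : Type} (array : List String)
    (f : α → String → Int × Int → α) (init : α) :
    (PySem.List.enumerate array).foldl
      (fun acc yrow =>
        (PySem.List.enumerate yrow.2.toList).foldl
          (fun acc2 xc => f acc2 (String.ofList [xc.2]) (xc.1, yrow.1)) acc)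
      init
    = (pvCells array).foldl (fun acc c => f acc c.1 c.2) init := by
  rw [pvCells, List.foldl_flatMap]
  simp [List.foldl_map]

theorem pvMapform_of_not_mem (d : List (String × List (Int × Int))) (k : String) (p : Int × Int)
    (h : d.any (fun kv => kv.1 == k) = false) :
    d.map (fun kv => (kv.1, kv.2 ++ if kv.1 == k then [p] else [])) = d := by
  induction d with
  | nil => rfl
  | cons hd tl ih =>
    simp only [List.any_cons, Bool.or_eq_false_iff] at h
    rw [List.map_cons, ih h.2]
    simp [h.1]

theorem pvAppendAt_map (d : List (String × List (Int × Int))) (k : String) (p : Int × Int)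
    (h : (d.map Prod.fst).Nodup) :
    pvAppendAt d k p
      = d.map (fun kv => (kv.1, kv.2 ++ if kv.1 == k then [p] else [])) := by
  induction d with
  | nil => rfl
  | cons hd tl ih =>
    obtain ⟨k', v⟩ := hd
    simp only [List.map_cons, List.nodup_cons] at h
    rw [pvAppendAt]
    by_cases hk : k' = k
    · subst hk
      have hany : tl.any (fun kv => kv.1 == k') = false := by
        rw [List.any_eq_false]
        intro kv hkv
        simp only [beq_iff_eq]
        exact fun he => h.1 (he ▸ List.mem_map_of_mem hkv)
      rw [List.map_cons, pvMapform_of_not_mem tl k' p hany]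
      simp
    · rw [if_neg (by simpa using hk), List.map_cons, ih h.2]
      simp [hk]

theorem pvAstep_map (d : List (String × List (Int × Int))) (k : String) (p : Int × Int)
    (h : (d.map Prod.fst).Nodup) :
    (if d.any (fun kv => kv.1 == k) then pvAppendAt d k p else d)
      = d.map (fun kv => (kv.1, kv.2 ++ if kv.1 == k then [p] else [])) := by
  by_cases hm : d.any (fun kv => kv.1 == k) = true
  · rw [if_pos hm]; exact pvAppendAt_map d k p h
  · rw [if_neg hm]
    exact (pvMapform_of_not_mem d k p (eq_false_of_ne_true hm)).symm

theorem pvFoldA (cells : List (String × (Int × Int)))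
    (d : List (String × List (Int × Int))) (h : (d.map Prod.fst).Nodup) :
    cells.foldl
      (fun acc c => if acc.any (fun kv => kv.1 == c.1) then pvAppendAt acc c.1 c.2 else acc) d
      = d.map (fun kv => (kv.1, kv.2 ++ (cells.filter (fun c => c.1 == kv.1)).map (·.2))) := by
  induction cells generalizing d with
  | nil => simp
  | cons c cs ih =>
    rw [List.foldl_cons, pvAstep_map d c.1 c.2 h]
    rw [ih _ (by simpa using h)]
    rw [List.map_map]
    apply List.map_congr_left
    intro kv _
    simp only [Function.comp_apply, List.filter_cons]
    by_cases hk : kv.1 = c.1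
    · simp [hk, List.append_assoc]
    · have h1 : (kv.1 == c.1) = false := by simpa using hk
      have h2 : (c.1 == kv.1) = false := by simpa using (Ne.symm hk)
      simp [h1, h2]

theorem pvGetD_setAppend (d : List (String × List (Int × Int))) (k k' : String) (p : Int × Int) :
    pvGetD (pvSetAppend d k' p) k = pvGetD d k ++ (if k' == k then [p] else []) := by
  induction d with
  | nil => by_cases hk : k' = k <;> simp [pvSetAppend, pvGetD, hk]
  | cons hd tl ih =>
    obtain ⟨a, v⟩ := hd
    by_cases ha : a = k'
    · subst ha
      rw [pvSetAppend, if_pos (by simp)]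
      by_cases hk : a = k
      · subst hk; simp [pvGetD]
      · simp [pvGetD, (show (a == k) = false by simpa using hk)]
    · rw [pvSetAppend, if_neg (by simpa using ha)]
      by_cases hk : a = k
      · subst hk
        have hne : (k' == a) = false := by simpa using (Ne.symm ha)
        simp [pvGetD, hne]
      · simp [pvGetD, (show (a == k) = false by simpa using hk), ih]

theorem pvFoldOcc (cells : List (String × (Int × Int)))
    (d : List (String × List (Int × Int))) (k : String) :
    pvGetD (cells.foldl (fun acc c => pvSetAppend acc c.1 c.2) d) k
      = pvGetD d k ++ (cells.filter (fun c => c.1 == k)).map (·.2) := by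
  induction cells generalizing d with
  | nil => simp
  | cons c cs ih =>
    rw [List.foldl_cons, ih, pvGetD_setAppend, List.filter_cons]
    by_cases hk : c.1 = k
    · simp [hk, List.append_assoc]
    · simp [(show (c.1 == k) = false by simpa using hk)]

-- ===== VERDICT (by name: the statement is the Claim_ definition above) =====
theorem find_letters_in_array_spec : Claim_equal_find_letters_in_array := by
  intro array letters _ hPre
  unfold Spec_find_letters_in_array find_letters_in_array find_letters_in_array_alt pvOccIndex
  rw [pvNested_foldl array (fun acc k p =>
        if acc.any (fun kv => kv.1 == k) then pvAppendAt acc k p else acc) letters,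
      pvNested_foldl array (fun acc k p => pvSetAppend acc k p) []]
  rw [pvFoldA (pvCells array) letters hPre.2]
  apply List.map_congr_left
  intro kv _
  rw [pvFoldOcc]
  rfl
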